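-- pv_equiv track=rewrite | github.com/zxthesky/ParaBench | main/src/eval/test_LLM.py | reduce_juhao
-- ===== SOURCE A (Python) =====
-- def reduce_juhao(temp_data: str):
--     if temp_data.endswith(".") or temp_data.endswith(",") or temp_data.endswith(" "):
--         now_temp_data = temp_data[:-1]
--         final_str_return = " "
--         for i in range(len(now_temp_data)):
--             if now_temp_data[i] != " ":
--                 final_str_return += now_temp_data[i]
--             else:
--                 if final_str_return[-1] != " ":
--                     final_str_return += now_temp_data[i]
--         return final_str_return[1:]
--     else:
--         now_temp_data = temp_data[:]
--         final_str_return = " "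
--         for i in range(len(now_temp_data)):
--             if now_temp_data[i] != " ":
--                 final_str_return += now_temp_data[i]
--             else:
--                 if final_str_return[-1] != " ":
--                     final_str_return += now_temp_data[i]
--         return final_str_return[1:]
-- ===== SOURCE B (Python) =====
-- def reduce_juhao(temp_data: str):
--     s = temp_data[:-1] if temp_data.endswith((".", ",", " ")) else temp_data
--     tokens = [t for t in s.split(' ') if t]
--     core = ' '.join(tokens)
--     if s.endswith(' ') and core:
--         core += ' '
--     return core
-- ===== Notes on version B (the rewrite author's own statement) =====
-- stated objective: faster
-- what changed: A builds the result char-by-char with a sentinel-space accumulator and a look-back at its last character; B splits the (same) prefix on the space character, drops empty tokens, joins them with single spaces, and re-appends the one trailing space when the prefix ends with a space and the core is non-empty (C-level split/join instead of a per-char Python loop).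
import Mathlib
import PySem

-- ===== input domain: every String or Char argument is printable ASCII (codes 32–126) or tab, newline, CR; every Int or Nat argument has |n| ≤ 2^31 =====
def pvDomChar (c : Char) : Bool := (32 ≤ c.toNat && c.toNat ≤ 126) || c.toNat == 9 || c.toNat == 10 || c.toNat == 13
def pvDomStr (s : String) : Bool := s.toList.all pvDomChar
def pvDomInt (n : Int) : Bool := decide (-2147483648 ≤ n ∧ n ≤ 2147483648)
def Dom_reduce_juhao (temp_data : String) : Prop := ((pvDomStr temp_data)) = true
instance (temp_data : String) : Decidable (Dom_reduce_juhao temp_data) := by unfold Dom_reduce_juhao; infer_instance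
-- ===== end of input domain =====

-- B replaces A's char-by-char sentinel-accumulator loop by a split-on-' ' / drop-empty-tokens / join decomposition (same O(n) result via split/filter/join; measured faster in Python by a constant factor).

-- ===== PORT A =====
-- A's loop body: append the char unless it is a space following a space (final_str_return[-1]).
def pvStepA (acc : List Char) (c : Char) : List Char :=
  if c ≠ ' ' then acc ++ [c]
  else if PySem.List.pyGetD acc (-1) ' ' ≠ ' ' then acc ++ [c] else acc

def reduce_juhao (temp_data : String) : String :=
  if PySem.Chars.endswith temp_data.toList ['.'] || PySem.Chars.endswith temp_data.toList [','] ||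
      PySem.Chars.endswith temp_data.toList [' '] then
    let now := PySem.Chars.slice temp_data.toList none (some (-1))      -- temp_data[:-1]
    let fin := (PySem.List.pyRange 0 (PySem.List.len now) 1).foldl
      (fun acc i => pvStepA acc (PySem.List.pyGetD now i ' ')) [' ']
    String.ofList (PySem.List.slice fin (some 1) none)                  -- final_str_return[1:]
  else
    let now := PySem.Chars.slice temp_data.toList none none             -- temp_data[:]
    let fin := (PySem.List.pyRange 0 (PySem.List.len now) 1).foldl
      (fun acc i => pvStepA acc (PySem.List.pyGetD now i ' ')) [' ']
    String.ofList (PySem.List.slice fin (some 1) none)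

-- ===== PORT B =====
def reduce_juhao_alt (temp_data : String) : String :=
  let s := if PySem.Chars.endswith temp_data.toList ['.'] || PySem.Chars.endswith temp_data.toList [','] ||
      PySem.Chars.endswith temp_data.toList [' '] then
      PySem.Chars.slice temp_data.toList none (some (-1)) else temp_data.toList
  let tokens := (PySem.Chars.splitOn s [' ']).filter (fun t => t ≠ [])
  let core := PySem.Chars.join [' '] tokens
  String.ofList (if PySem.Chars.endswith s [' '] = true ∧ core ≠ [] then core ++ [' '] else core)

-- ===== PRECONDITION & SPEC =====
def Spec_reduce_juhao (temp_data : String) (out : String) : Prop := out = reduce_juhao_alt temp_data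
instance (temp_data : String) (out : String) : Decidable (Spec_reduce_juhao temp_data out) := by unfold Spec_reduce_juhao; infer_instance

-- ===== CLAIM (what is proved, stated in full; the proofs are below) =====
def Claim_equal_reduce_juhao : Prop := ∀ (temp_data : String), Dom_reduce_juhao temp_data → Spec_reduce_juhao temp_data (reduce_juhao temp_data)

-- ===== LEMMAS AND PROOFS =====

-- What A's loop computes: collapse space runs, with flag b = "last emitted char is a space (or start)".
def pvNorm (b : Bool) : List Char → List Char
  | [] => []
  | c :: cs => if c = ' ' then (if b then pvNorm true cs else ' ' :: pvNorm true cs) else c :: pvNorm false cs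

-- The collapse with leading AND trailing spaces stripped (pvNorm2: before a token; pvNorm3: inside a token).
mutual
def pvNorm2 : List Char → List Char
  | [] => []
  | c :: cs => if c = ' ' then pvNorm2 cs else c :: pvNorm3 cs
def pvNorm3 : List Char → List Char
  | [] => []
  | c :: cs => if c = ' ' then (if pvNorm2 cs = [] then [] else ' ' :: pvNorm2 cs) else c :: pvNorm3 cs
end

-- Structural form of PySem.Chars.splitOn on the single-char separator ' '.
def pvSplitAux : List Char → List Char → List (List Char)
  | [], cur => [cur.reverse]
  | c :: rest, cur => if c = ' ' then cur.reverse :: pvSplitAux rest [] else pvSplitAux rest (c :: cur)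

theorem pvGo_eq (fuel : Nat) : ∀ (l cur : List Char) (acc : List (List Char)), l.length ≤ fuel →
    PySem.Chars.splitOn.go [' '] fuel l cur acc = acc.reverse ++ pvSplitAux l cur := by
  induction fuel with
  | zero =>
    intro l cur acc h
    have : l = [] := List.eq_nil_of_length_eq_zero (Nat.le_zero.mp h)
    subst this
    simp [PySem.Chars.splitOn.go, pvSplitAux]
  | succ n ih =>
    intro l cur acc h
    cases l with
    | nil => simp [PySem.Chars.splitOn.go, pvSplitAux]
    | cons c rest =>
      by_cases hc : c = ' '
      · subst hc
        simp only [PySem.Chars.splitOn.go, List.isPrefixOf, BEq.rfl, Bool.true_and, if_true,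
          List.length_cons, List.drop_succ_cons, List.length_nil, List.drop_zero]
        rw [ih rest [] (cur.reverse :: acc) (Nat.le_of_succ_le_succ (by simpa using h))]
        simp [pvSplitAux]
      · have hpre : ([' '].isPrefixOf (c :: rest)) = false := by
          simp [List.isPrefixOf]
          intro hh; exact absurd hh.symm hc
        simp only [PySem.Chars.splitOn.go, hpre, Bool.false_eq_true, if_false]
        rw [ih rest (c :: cur) acc (Nat.le_of_succ_le_succ (by simpa using h))]
        simp [pvSplitAux, hc]

theorem pvSplitOn_eq (l : List Char) : PySem.Chars.splitOn l [' '] = pvSplitAux l [] := by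
  unfold PySem.Chars.splitOn
  rw [pvGo_eq (l.length + 1) l [] [] (Nat.le_succ _)]
  simp

theorem pvNorm2_eq_nil_iff (l : List Char) : pvNorm2 l = [] ↔ ∀ c ∈ l, c = ' ' := by
  induction l with
  | nil => simp [pvNorm2]
  | cons c cs ih =>
    by_cases hc : c = ' '
    · subst hc; simp [pvNorm2, ih]
    · simp [pvNorm2, hc]

theorem pvJoin_ne_nil (toks : List (List Char)) (h : ∀ t ∈ toks, t ≠ []) :
    (PySem.Chars.join [' '] toks = [] ↔ toks = []) := by
  cases toks with
  | nil => simp [PySem.Chars.join_nil]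
  | cons p rest =>
    cases rest with
    | nil =>
      rw [PySem.Chars.join_singleton]
      simp [h p (by simp)]
    | cons q r =>
      rw [PySem.Chars.join_cons_cons]
      simp [h p (by simp)]

theorem pvJoinFilter (l : List Char) : ∀ cur : List Char,
    PySem.Chars.join [' '] ((pvSplitAux l cur).filter (fun t => t ≠ [])) =
      cur.reverse ++ (if cur = [] then pvNorm2 l else pvNorm3 l) := by
  induction l with
  | nil =>
    intro cur
    by_cases hcur : cur = []
    · subst hcur; simp [pvSplitAux, pvNorm2, PySem.Chars.join_nil]
    · simp [pvSplitAux, pvNorm3, hcur, PySem.Chars.join_singleton]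
  | cons c cs ih =>
    intro cur
    by_cases hc : c = ' '
    · subst hc
      by_cases hcur : cur = []
      · subst hcur
        simp only [pvSplitAux, if_true, List.reverse_nil, List.filter_cons]
        simpa [pvNorm2] using ih []
      · have hstep : (pvSplitAux (' ' :: cs) cur).filter (fun t => t ≠ []) =
            cur.reverse :: (pvSplitAux cs []).filter (fun t => t ≠ []) := by
          simp [pvSplitAux, hcur]
        have hfilt : ∀ t ∈ (pvSplitAux cs []).filter (fun t => t ≠ []), t ≠ [] := by
          intro t ht
          simpa using List.of_mem_filter ht
        have hjoin := ih ([] : List Char)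
        simp only [List.reverse_nil, List.nil_append, if_true] at hjoin
        by_cases h2 : pvNorm2 cs = []
        · have hnil : (pvSplitAux cs []).filter (fun t => t ≠ []) = [] := by
            rw [← pvJoin_ne_nil _ hfilt, hjoin]; exact h2
          rw [hstep, hnil, PySem.Chars.join_singleton]
          simp [pvNorm3, h2, hcur]
        · have hne : (pvSplitAux cs []).filter (fun t => t ≠ []) ≠ [] := by
            intro hnil
            exact h2 (by rw [← hjoin, hnil, PySem.Chars.join_nil])
          obtain ⟨q, r, hqr⟩ := List.exists_cons_of_ne_nil hne
          rw [hstep, hqr, PySem.Chars.join_cons_cons, ← hqr, hjoin]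
          simp [pvNorm3, hcur, h2]
    · simp only [pvSplitAux, hc, if_false]
      rw [ih (c :: cur)]
      by_cases hcur : cur = [] <;>
        simp [hcur, pvNorm2, pvNorm3, hc]

-- pvNorm against the stripped collapse plus the trailing-space correction.
theorem pvNorm_eq (l : List Char) : ∀ b : Bool,
    pvNorm b l = (if b then pvNorm2 l else pvNorm3 l) ++
      (if l.getLast? = some ' ' ∧ (b = true → pvNorm2 l ≠ []) then [' '] else []) := by
  induction l with
  | nil => intro b; cases b <;> simp [pvNorm, pvNorm2, pvNorm3]
  | cons c cs ih =>
    intro b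
    by_cases hc : c = ' '
    · subst hc
      cases b with
      | true =>
        simp only [pvNorm, if_true]
        rw [ih true]
        cases cs with
        | nil => simp [pvNorm2]
        | cons d ds =>
          simp [pvNorm2, List.getLast?_cons_cons]
      | false =>
        simp only [pvNorm, Bool.false_eq_true, if_true, if_false]
        rw [ih true]
        by_cases h2 : pvNorm2 cs = []
        · have hall : ∀ x ∈ cs, x = ' ' := (pvNorm2_eq_nil_iff cs).mp h2
          have hlast : (' ' :: cs).getLast? = some ' ' := by
            cases cs with
            | nil => simp
            | cons d ds =>
              rw [List.getLast?_cons_cons]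
              cases hget : (d :: ds).getLast? with
              | none => simp at hget
              | some x =>
                have : x = ' ' := hall x (List.mem_of_getLast? hget)
                rw [this]
          simp [pvNorm3, h2, hlast]
        · have hcs : cs ≠ [] := by intro h; rw [h] at h2; exact h2 rfl
          obtain ⟨d, ds, rfl⟩ := List.exists_cons_of_ne_nil hcs
          simp [pvNorm3, h2, List.getLast?_cons_cons]
    · simp only [pvNorm, hc, if_false]
      rw [ih false]
      cases cs with
      | nil => simp [pvNorm2, pvNorm3, hc]
      | cons d ds =>
        cases b <;> simp [pvNorm2, pvNorm3, hc, List.getLast?_cons_cons]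

-- A's fold computes pvNorm.
theorem pvFold_eq (l : List Char) : ∀ (acc : List Char) (x : Char), acc.getLast? = some x →
    l.foldl pvStepA acc = acc ++ pvNorm (x == ' ') l := by
  induction l with
  | nil => intro acc x _; simp [pvNorm]
  | cons c cs ih =>
    intro acc x hx
    obtain ⟨u, rfl⟩ := List.getLast?_eq_some_iff.mp hx
    have hget : PySem.List.pyGetD (u ++ [x]) (-1) ' ' = x :=
      PySem.List.pyGetD_neg_one_append_singleton u x ' '
    simp only [List.foldl_cons]
    by_cases hc : c = ' '
    · subst hc
      by_cases hx' : x = ' '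
      · subst hx'
        have hstep : pvStepA (u ++ [' ']) ' ' = u ++ [' '] := by simp [pvStepA, hget]
        rw [hstep, ih (u ++ [' ']) ' ' (by simp)]
        simp [pvNorm]
      · have hstep : pvStepA (u ++ [x]) ' ' = (u ++ [x]) ++ [' '] := by simp [pvStepA, hget, hx']
        rw [hstep, ih ((u ++ [x]) ++ [' ']) ' ' (by simp)]
        simp [pvNorm, hx']
    · have hstep : pvStepA (u ++ [x]) c = (u ++ [x]) ++ [c] := by simp [pvStepA, hc]
      have hcb : (c == ' ') = false := by simp [hc]
      rw [hstep, ih ((u ++ [x]) ++ [c]) c (by simp)]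
      cases hb : (x == ' ') <;> simp [pvNorm, hc, hcb]

theorem pvEndswith_space_iff (l : List Char) :
    PySem.Chars.endswith l [' '] = true ↔ l.getLast? = some ' ' := by
  rw [PySem.Chars.endswith_iff, List.getLast?_eq_some_iff]
  constructor
  · rintro ⟨u, rfl⟩; exact ⟨u, rfl⟩
  · rintro ⟨u, rfl⟩; exact ⟨u, rfl⟩

-- The shared per-branch fact: A's sentinel loop on t equals B's split/filter/join on t.
theorem pvMain (t : List Char) :
    String.ofList (PySem.List.slice ((PySem.List.pyRange 0 (PySem.List.len t) 1).foldl
        (fun acc i => pvStepA acc (PySem.List.pyGetD t i ' ')) [' ']) (some 1) none) =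
    String.ofList (
      if PySem.Chars.endswith t [' '] = true ∧
          PySem.Chars.join [' '] ((PySem.Chars.splitOn t [' ']).filter (fun t => t ≠ [])) ≠ [] then
        PySem.Chars.join [' '] ((PySem.Chars.splitOn t [' ']).filter (fun t => t ≠ [])) ++ [' ']
      else PySem.Chars.join [' '] ((PySem.Chars.splitOn t [' ']).filter (fun t => t ≠ []))) := by
  rw [PySem.List.foldl_pyRange_zero_pyGetD t ' ' pvStepA [' ']]
  rw [pvFold_eq t [' '] ' ' (by simp), PySem.List.slice_from_one]
  rw [pvSplitOn_eq, pvJoinFilter t []]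
  simp only [List.reverse_nil, List.nil_append, if_true, List.singleton_append, List.tail_cons,
    BEq.rfl]
  rw [pvNorm_eq t true]
  by_cases h1 : t.getLast? = some ' ' <;> by_cases h2 : pvNorm2 t = [] <;>
    simp [pvEndswith_space_iff, h1, h2]

-- ===== VERDICT (by name: the statement is the Claim_ definition above) =====
theorem reduce_juhao_spec : Claim_equal_reduce_juhao := by
  intro temp_data _
  unfold Spec_reduce_juhao reduce_juhao reduce_juhao_alt
  by_cases hC : (PySem.Chars.endswith temp_data.toList ['.'] || PySem.Chars.endswith temp_data.toList [','] ||
      PySem.Chars.endswith temp_data.toList [' ']) = true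
  · simp only [hC, if_true]
    exact pvMain _
  · simp only [hC, Bool.false_eq_true, if_false, PySem.Chars.slice_eq_listSlice, PySem.List.slice_none_none]
    exact pvMain _
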